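-- pv_equiv track=rewrite | github.com/joshheald/muddypearl-orders | orderparser/storeorderparser.py | strings_from_lines
-- ===== SOURCE A (Python) =====
-- def strings_from_lines(lines, delimiter):
-- 	strings = []
-- 	string = ""
-- 	for line in lines:
-- 		if line.strip() != delimiter:
-- 			string += line
-- 		else:
-- 			strings.append(string)
-- 			string = ""
-- 	return strings
-- ===== SOURCE B (Python) =====
-- def strings_from_lines(lines, delimiter):
--     stripped = [l.strip() for l in lines]
--     try:
--         i = stripped.index(delimiter)
--     except ValueError:
--         return []
--     return [''.join(lines[:i])] + strings_from_lines(lines[i+1:], delimiter)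
-- ===== Notes on version B (the rewrite author's own statement) =====
-- stated objective: alternative
-- what changed: Replaces A's single accumulator loop (growing a current string and flushing it at each delimiter) by recursive splitting: find the first delimiter with list.index, join the prefix in one shot, recurse on the remainder; content after the last delimiter is dropped because the recursion simply ends.
import Mathlib
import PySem

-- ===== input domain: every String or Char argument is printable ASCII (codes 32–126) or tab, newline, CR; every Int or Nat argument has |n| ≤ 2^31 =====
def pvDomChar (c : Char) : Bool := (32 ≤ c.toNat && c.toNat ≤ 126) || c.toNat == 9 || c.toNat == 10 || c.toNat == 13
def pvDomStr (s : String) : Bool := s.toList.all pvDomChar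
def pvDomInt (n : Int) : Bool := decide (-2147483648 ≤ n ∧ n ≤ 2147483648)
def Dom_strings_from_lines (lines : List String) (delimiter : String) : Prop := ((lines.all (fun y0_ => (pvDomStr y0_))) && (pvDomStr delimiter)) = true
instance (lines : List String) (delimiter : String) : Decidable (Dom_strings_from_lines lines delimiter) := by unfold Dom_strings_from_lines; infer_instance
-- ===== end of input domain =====

-- B replaces A's accumulator loop by recursive splitting at the first delimiter (alternative decomposition, same cost).


-- ===== PORT A =====
-- loop state: (strings, string); 'string += line' appends, a delimiter line flushes 'string'
def strings_from_lines (lines : List String) (delimiter : String) : List String :=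
  (lines.foldl
    (fun (st : List String × String) line =>
      if PySem.Str.strip line ≠ delimiter then (st.1, st.2 ++ line)
      else (st.1 ++ [st.2], ""))
    ([], "")).1

-- ===== PORT B =====
-- index of the first delimiter (i < lines.length), used for termination of the port of B
theorem pvIdxLt {lines : List String} {delimiter : String} {i : Nat}
    (h : PySem.List.index? (lines.map PySem.Str.strip) delimiter = some i) : i < lines.length := by
  obtain ⟨pre, suf, heq, hlen, _⟩ := (PySem.List.index?_eq_some_iff _ _ _).1 h
  have : (lines.map PySem.Str.strip).length = lines.length := List.length_map ..
  rw [heq] at this; simp at this; omega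

def strings_from_lines_alt (lines : List String) (delimiter : String) : List String :=
  match h : PySem.List.index? (lines.map PySem.Str.strip) delimiter with
  | none => []
  | some i =>
    PySem.Str.join "" (PySem.List.slice lines none (some (i : Int))) ::
      strings_from_lines_alt (PySem.List.slice lines (some ((i : Int) + 1)) none) delimiter
termination_by lines.length
decreasing_by
  have hi := pvIdxLt h
  have : ((i : Int) + 1) = ((i + 1 : Nat) : Int) := by push_cast; ring
  rw [this, PySem.List.slice_from_natCast]
  simp [List.length_drop]; omega

-- ===== PRECONDITION & SPEC =====
def Spec_strings_from_lines (lines : List String) (delimiter : String) (out : List String) : Prop := out = strings_from_lines_alt lines delimiter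
instance (lines : List String) (delimiter : String) (out : List String) : Decidable (Spec_strings_from_lines lines delimiter out) := by unfold Spec_strings_from_lines; infer_instance

-- ===== CLAIM (what is proved, stated in full; the proofs are below) =====
def Claim_equal_strings_from_lines : Prop := ∀ (lines : List String) (delimiter : String), Dom_strings_from_lines lines delimiter → Spec_strings_from_lines lines delimiter (strings_from_lines lines delimiter)

-- ===== LEMMAS AND PROOFS =====

-- prefix the head of the list with 'cur' (relates A's pending string to B's first group)
def pvPref (cur : String) : List String → List String
  | [] => []
  | s :: rest => (cur ++ s) :: rest

theorem pvStrAppend_assoc (a b c : String) : a ++ b ++ c = a ++ (b ++ c) := by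
  apply String.ext; simp

theorem pvJoin_empty_nil : PySem.Str.join "" ([] : List String) = "" := by
  apply String.ext; simp [PySem.Str.toList_join, PySem.Chars.join, List.intercalate]

theorem pvJoin_empty_cons (x : String) (xs : List String) :
    PySem.Str.join "" (x :: xs) = x ++ PySem.Str.join "" xs := by
  apply String.ext
  cases xs <;> simp [PySem.Str.toList_join, PySem.Chars.join, List.intercalate]

-- one-step equations for the port of B
theorem pvAlt_none {lines : List String} {delimiter : String}
    (h : PySem.List.index? (lines.map PySem.Str.strip) delimiter = none) :
    strings_from_lines_alt lines delimiter = [] := by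
  rw [strings_from_lines_alt]
  split
  · rfl
  · rename_i i hi; rw [h] at hi; exact absurd hi (by simp)

theorem pvAlt_some {lines : List String} {delimiter : String} {i : Nat}
    (h : PySem.List.index? (lines.map PySem.Str.strip) delimiter = some i) :
    strings_from_lines_alt lines delimiter
      = PySem.Str.join "" (PySem.List.slice lines none (some (i : Int))) ::
          strings_from_lines_alt (PySem.List.slice lines (some ((i : Int) + 1)) none) delimiter := by
  rw [strings_from_lines_alt]
  split
  · rename_i hi; rw [h] at hi; exact absurd hi (by simp)
  · rename_i j hj; rw [h] at hj
    obtain rfl : i = j := by injection hj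
    rfl

theorem pvAlt_nil (delimiter : String) : strings_from_lines_alt [] delimiter = [] :=
  pvAlt_none (by simp [PySem.List.index?])

theorem pvAlt_cons_ne (l : String) (ls : List String) (delimiter : String)
    (hne : PySem.Str.strip l ≠ delimiter) :
    strings_from_lines_alt (l :: ls) delimiter = pvPref l (strings_from_lines_alt ls delimiter) := by
  have hcons : PySem.List.index? ((l :: ls).map PySem.Str.strip) delimiter
      = (PySem.List.index? (ls.map PySem.Str.strip) delimiter).map (· + 1) := by
    simpa using PySem.List.index?_cons_of_ne (ls.map PySem.Str.strip) hne
  cases hidx : PySem.List.index? (ls.map PySem.Str.strip) delimiter with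
  | none =>
    rw [pvAlt_none (by rw [hcons, hidx]; rfl), pvAlt_none hidx]
    rfl
  | some i =>
    rw [pvAlt_some (show _ = some (i + 1) by rw [hcons, hidx]; rfl), pvAlt_some hidx]
    have h1 : (((i + 1 : Nat)) : Int) = ((i : Int) + 1) := by push_cast; ring
    have h2 : (((i + 1 : Nat)) : Int) + 1 = (((i + 2 : Nat)) : Int) := by push_cast; ring
    have h3 : ((i : Int) + 1) = (((i + 1 : Nat)) : Int) := by push_cast; ring
    rw [h2, h3, PySem.List.slice_to_natCast, PySem.List.slice_to_natCast,
      PySem.List.slice_from_natCast, PySem.List.slice_from_natCast]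
    simp [pvPref, List.take_succ_cons, List.drop_succ_cons, pvJoin_empty_cons]

theorem pvAlt_cons_eq (l : String) (ls : List String) (delimiter : String)
    (heq : PySem.Str.strip l = delimiter) :
    strings_from_lines_alt (l :: ls) delimiter = "" :: strings_from_lines_alt ls delimiter := by
  have hcons : PySem.List.index? ((l :: ls).map PySem.Str.strip) delimiter = some 0 := by
    simp only [List.map_cons, heq]
    exact PySem.List.index?_cons_self ..
  rw [pvAlt_some hcons,
    show ((0 : Nat) : Int) + 1 = ((1 : Nat) : Int) by norm_num,
    PySem.List.slice_from_natCast]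
  simp [PySem.List.slice, pvJoin_empty_nil]

theorem pvPref_empty (r : List String) : pvPref "" r = r := by
  cases r with
  | nil => rfl
  | cons s rest => simp [pvPref]

theorem pvKey (delimiter : String) :
    ∀ (lines : List String) (acc : List String) (cur : String),
    (lines.foldl
      (fun (st : List String × String) line =>
        if PySem.Str.strip line ≠ delimiter then (st.1, st.2 ++ line)
        else (st.1 ++ [st.2], ""))
      (acc, cur)).1
    = acc ++ pvPref cur (strings_from_lines_alt lines delimiter) := by
  intro lines
  induction lines with
  | nil => intro acc cur; simp [pvAlt_nil, pvPref]
  | cons l ls ih =>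
    intro acc cur
    by_cases h : PySem.Str.strip l = delimiter
    · rw [List.foldl_cons]
      simp only [h, ne_eq, not_true_eq_false, if_false, ih]
      rw [pvAlt_cons_eq l ls delimiter h, pvPref_empty]
      simp [pvPref]
    · rw [List.foldl_cons]
      simp only [ne_eq, h, not_false_eq_true, if_true, ih]
      rw [pvAlt_cons_ne l ls delimiter h]
      cases strings_from_lines_alt ls delimiter with
      | nil => simp [pvPref]
      | cons s rest => simp [pvPref, pvStrAppend_assoc]

-- ===== VERDICT (by name: the statement is the Claim_ definition above) =====
theorem strings_from_lines_spec : Claim_equal_strings_from_lines := by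
  intro lines delimiter _
  unfold Spec_strings_from_lines strings_from_lines
  rw [pvKey delimiter lines [] ""]
  simp [pvPref_empty]
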